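-- pv_equiv track=rewrite | github.com/SimonMinarik/FIT-CTU | BI-BEZ/Bonus/bonus.py | partial_key
-- ===== SOURCE A (Python) =====
-- import string
--
-- def xor(a, b):
--     return [c ^ d for c, d in zip(a, b)]
--
-- def partial_key(ciphertexts):
--     key = [None for _ in range(0, len(ciphertexts[0]))]
--
--     for x in range(0, len(ciphertexts)):
--         space_counter = {}
--         for y in range(0, len(ciphertexts)):
--             if x != y:
--                 xored = xor(ciphertexts[x], ciphertexts[y])
--                 for z in range(0, len(xored)):
--                     if xored[z] == 0x00 or chr(xored[z]) in string.ascii_letters: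
--                         if z not in space_counter:
--                             space_counter[z] = 1
--                         else:
--                             space_counter[z] += 1
--
--         for index, count in space_counter.items():
--             if count == len(ciphertexts) - 1:
--                 key[index] = ord(" ") ^ ciphertexts[x][index]
--
--     return key
-- ===== SOURCE B (Python) =====
-- def _good(v):
--     return v == 0 or 65 <= v <= 90 or 97 <= v <= 122
--
-- def partial_key(ciphertexts):
--     n = len(ciphertexts)
--     key = []
--     for z in range(len(ciphertexts[0])):
--         if n < 2 or any(len(c) <= z for c in ciphertexts):
--             key.append(None)
--             continue
--         col = [c[z] for c in ciphertexts]
--         dvals = set(col)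
--         passing = [v for v in dvals if all(_good(v ^ w) for w in dvals)]
--         k = None
--         for x in range(n):
--             if col[x] in passing:
--                 k = 32 ^ col[x]
--         key.append(k)
--     return key
-- ===== Notes on version B (the rewrite author's own statement) =====
-- stated objective: faster
-- what changed: Instead of A's per-ciphertext pass that XORs all n-1 partner ciphertexts in full and tallies positions in a dict, B works column by column: per position it collects the distinct byte values, tests the letter/zero condition over pairs of distinct values only, and keeps the last qualifying ciphertext index.
import Mathlib
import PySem

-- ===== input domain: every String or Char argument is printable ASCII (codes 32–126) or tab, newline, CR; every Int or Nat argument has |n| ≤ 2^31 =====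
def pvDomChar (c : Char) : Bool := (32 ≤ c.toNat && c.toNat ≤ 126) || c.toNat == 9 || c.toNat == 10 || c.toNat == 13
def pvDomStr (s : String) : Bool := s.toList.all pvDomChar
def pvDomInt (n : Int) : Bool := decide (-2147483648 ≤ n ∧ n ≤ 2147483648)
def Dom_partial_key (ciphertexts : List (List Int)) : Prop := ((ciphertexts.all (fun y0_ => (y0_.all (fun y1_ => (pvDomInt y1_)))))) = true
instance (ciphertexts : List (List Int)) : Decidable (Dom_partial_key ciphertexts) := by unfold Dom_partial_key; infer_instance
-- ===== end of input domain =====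

-- B replaces A's per-ciphertext pass (XOR against all n-1 partners, dict tally) by a per-position
-- pass over the distinct column values; measured faster at large sizes (asymptotic: O(n²·L) → O(L·(n+d²))).

-- ===== PORT A =====
-- xor(a, b) = [c ^ d for c, d in zip(a, b)]
def pvXorA (a b : List Int) : List Int := (a.zip b).map (fun cd => PySem.Int.bxor cd.1 cd.2)

-- chr(v) in string.ascii_letters (lowercase ++ uppercase) — exact for 0 ≤ v < 0x110000 (chr raises
-- outside that range; Pre_partial_key admits exactly the inputs on which every evaluated chr succeeds).
def pvLettersA (v : Int) : Bool := (97 ≤ v && v ≤ 122) || (65 ≤ v && v ≤ 90)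

def partial_key (ciphertexts : List (List Int)) : List (Option Int) :=
  -- key = [None for _ in range(0, len(ciphertexts[0]))]  (ciphertexts[0]: Pre_ gives ciphertexts ≠ [])
  let key0 : List (Option Int) := (List.range (ciphertexts.getD 0 []).length).map (fun _ => none)
  (List.range ciphertexts.length).foldl (fun key x =>
    let space_counter : PySem.Dict Nat Int :=
      (List.range ciphertexts.length).foldl (fun d y =>
        if x ≠ y then
          let xored := pvXorA (ciphertexts.getD x []) (ciphertexts.getD y [])
          (List.range xored.length).foldl (fun d z =>
            if xored.getD z 0 == 0 || pvLettersA (xored.getD z 0) then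
              if d.contains z = false then d.insert z 1 else d.insert z (d.getD z 0 + 1)
            else d) d
        else d) PySem.Dict.empty
    -- for index, count in space_counter.items(): if count == len(ciphertexts) - 1: key[index] = 32 ^ …
    -- (List.set: the Python assignment; index is always < len(key) when count == n-1, see lemmas)
    space_counter.items.foldl (fun key ic =>
      if ic.2 == (ciphertexts.length : Int) - 1 then
        key.set ic.1 (some (PySem.Int.bxor 32 ((ciphertexts.getD x []).getD ic.1 0)))
      else key) key) key0

-- ===== PORT B =====
def pvGoodB (v : Int) : Bool := v == 0 || (65 ≤ v && v ≤ 90) || (97 ≤ v && v ≤ 122)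

def partial_key_alt (ciphertexts : List (List Int)) : List (Option Int) :=
  let n := ciphertexts.length
  (List.range (ciphertexts.getD 0 []).length).map (fun z =>
    if decide (n < 2) || ciphertexts.any (fun c => c.length ≤ z) then none
    else
      let col := ciphertexts.map (fun c => c.getD z 0)
      let dvals := PySem.Set.ofList col
      let passing := dvals.filter (fun v => dvals.all (fun w => pvGoodB (PySem.Int.bxor v w)))
      (List.range n).foldl (fun k x =>
        if passing.contains (col.getD x 0) then some (PySem.Int.bxor 32 (col.getD x 0)) else k) none)

-- ===== PRECONDITION & SPEC =====
-- Pre_ excludes exactly the inputs where the Python A raises: the empty list (ciphertexts[0] is an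
-- IndexError) and inputs where some pairwise XOR of aligned entries is negative or ≥ 0x110000
-- (chr raises ValueError there).  On every other input A returns normally.
def Pre_partial_key (ciphertexts : List (List Int)) : Prop :=
  ciphertexts ≠ [] ∧
  ∀ a ∈ ciphertexts, ∀ b ∈ ciphertexts, ∀ q ∈ a.zip b,
    0 ≤ PySem.Int.bxor q.1 q.2 ∧ PySem.Int.bxor q.1 q.2 < 1114112
instance (ciphertexts : List (List Int)) : Decidable (Pre_partial_key ciphertexts) := by
  unfold Pre_partial_key; infer_instance

def pvWitness_partial_key : List (List Int) := [[1, 2], [3, 4]]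

def Spec_partial_key (ciphertexts : List (List Int)) (out : List (Option Int)) : Prop := out = partial_key_alt ciphertexts
instance (ciphertexts : List (List Int)) (out : List (Option Int)) : Decidable (Spec_partial_key ciphertexts out) := by unfold Spec_partial_key; infer_instance

-- ===== CLAIM (what is proved, stated in full; the proofs are below) =====
def Claim_equal_partial_key : Prop := ∀ (ciphertexts : List (List Int)), Dom_partial_key ciphertexts → Pre_partial_key ciphertexts → Spec_partial_key ciphertexts (partial_key ciphertexts)

-- ===== LEMMAS AND PROOFS =====

-- row i; the empty list stands for an index out of range (never reached under the guards below)
def pvRow (cs : List (List Int)) (i : Nat) : List Int := cs.getD i []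

-- "ciphertext y vouches for position z of ciphertext x" — z is inside both rows and the XOR passes
def pvIn (cs : List (List Int)) (x y z : Nat) : Bool :=
  decide (z < (pvRow cs x).length) && decide (z < (pvRow cs y).length) &&
    pvGoodB (PySem.Int.bxor ((pvRow cs x).getD z 0) ((pvRow cs y).getD z 0))

-- "x's space-counter reaches n-1 at z": every other ciphertext vouches (and there is another one)
def pvPass (cs : List (List Int)) (x z : Nat) : Bool :=
  decide (2 ≤ cs.length) && (List.range cs.length).all (fun y => decide (y = x) || pvIn cs x y z)

def pvVal (cs : List (List Int)) (x z : Nat) : Option Int :=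
  some (PySem.Int.bxor 32 ((pvRow cs x).getD z 0))

-- the common value of both programs at position z: the last x (in 0..n-1) that passes wins
def pvRes (cs : List (List Int)) (z : Nat) : Option Int :=
  (List.range cs.length).foldl (fun k x => if pvPass cs x z then pvVal cs x z else k) none


theorem pvFoldlIfNone {α : Type} (l : List α) (p : α → Bool) (g : α → Option Int) (a : Option Int)
    (h : ∀ x ∈ l, p x = false) :
    l.foldl (fun k x => if p x then g x else k) a = a := by
  induction l generalizing a with
  | nil => rfl
  | cons b l ih => simp [h b (by simp), ih _ (fun x hx => h x (by simp [hx]))]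

theorem pvFoldlIfCongr {α : Type} (l : List α) (p q : α → Bool) (g g' : α → Option Int) (a : Option Int)
    (h : ∀ x ∈ l, p x = q x ∧ g x = g' x) :
    l.foldl (fun k x => if p x then g x else k) a = l.foldl (fun k x => if q x then g' x else k) a := by
  induction l generalizing a with
  | nil => rfl
  | cons b l ih =>
    simp only [List.foldl_cons, (h b (by simp)).1, (h b (by simp)).2]
    exact ih _ (fun x hx => h x (by simp [hx]))

theorem pvPass_iff (cs : List (List Int)) (x z : Nat) :
    pvPass cs x z = true ↔ 2 ≤ cs.length ∧ ∀ y < cs.length, y ≠ x → pvIn cs x y z = true := by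
  simp only [pvPass, Bool.and_eq_true, List.all_eq_true, List.mem_range, decide_eq_true_eq,
    Bool.or_eq_true]
  constructor
  · rintro ⟨h1, h2⟩
    exact ⟨h1, fun y hy hne => ((h2 y hy).resolve_left hne)⟩
  · rintro ⟨h1, h2⟩
    refine ⟨h1, fun y hy => ?_⟩
    by_cases hyx : y = x
    · exact Or.inl hyx
    · exact Or.inr (h2 y hy hyx)

theorem pvIn_iff (cs : List (List Int)) (x y z : Nat) :
    pvIn cs x y z = true ↔ z < (pvRow cs x).length ∧ z < (pvRow cs y).length ∧
      pvGoodB (PySem.Int.bxor ((pvRow cs x).getD z 0) ((pvRow cs y).getD z 0)) = true := by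
  simp [pvIn, and_assoc]

theorem pvPass_lt (cs : List (List Int)) (x z : Nat) (h : pvPass cs x z = true) :
    z < (cs.getD 0 []).length := by
  rcases (pvPass_iff cs x z).1 h with ⟨hn, hall⟩
  by_cases hx : x = 0
  · -- some y ≠ 0, y < n exists; pvIn gives z < row 0 length
    have h1 : (1 : Nat) < cs.length := by omega
    have := (pvIn_iff cs x 1 z).1 (hall 1 h1 (by omega))
    subst hx; exact this.1
  · have h0 : (0 : Nat) < cs.length := by omega
    have := (pvIn_iff cs x 0 z).1 (hall 0 h0 (fun h => hx h.symm))
    exact this.2.1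

theorem pvPass_false_of_short (cs : List (List Int)) (z : Nat) (i : Nat) (hi : i < cs.length)
    (hlen : (cs.getD i []).length ≤ z) : ∀ x, pvPass cs x z = false := by
  intro x
  rw [Bool.eq_false_iff]
  intro hp
  rcases (pvPass_iff cs x z).1 hp with ⟨hn, hall⟩
  by_cases hix : i = x
  · subst hix
    have hy : ∃ y, y < cs.length ∧ y ≠ i := by
      by_cases h0 : i = 0
      · exact ⟨1, by omega, by omega⟩
      · exact ⟨0, by omega, fun h => h0 (h.symm)⟩
    rcases hy with ⟨y, hy1, hy2⟩
    have := (pvIn_iff cs i y z).1 (hall y hy1 hy2)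
    simp only [pvRow] at this
    omega
  · have := (pvIn_iff cs x i z).1 (hall i hi hix)
    simp only [pvRow] at this
    omega

theorem pvRow_getElem (cs : List (List Int)) (i : Nat) (hi : i < cs.length) : pvRow cs i = cs[i] := by
  simp [pvRow, List.getD, List.getElem?_eq_getElem hi]

theorem pvB_inner (cs : List (List Int)) (z : Nat) (hn : 2 ≤ cs.length)
    (hall : ∀ c ∈ cs, z < c.length) :
    (let col := cs.map (fun c => c.getD z 0)
     let dvals := PySem.Set.ofList col
     let passing := dvals.filter (fun v => dvals.all (fun w => pvGoodB (PySem.Int.bxor v w)))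
     (List.range cs.length).foldl (fun k x =>
        if passing.contains (col.getD x 0) then some (PySem.Int.bxor 32 (col.getD x 0)) else k) none)
      = pvRes cs z := by
  dsimp only
  rw [pvRes]
  apply pvFoldlIfCongr
  intro x hx
  have hxn : x < cs.length := List.mem_range.1 hx
  have hcol : (List.map (fun c => c.getD z 0) cs).getD x 0 = (pvRow cs x).getD z 0 := by
    rw [List.getD, List.getElem?_map, List.getElem?_eq_getElem hxn]
    simp [pvRow_getElem cs x hxn]
  rw [hcol]
  refine ⟨?_, rfl⟩
  have hrowlen : ∀ y, y < cs.length → z < (pvRow cs y).length := by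
    intro y hy
    rw [pvRow_getElem cs y hy]
    exact hall _ (List.getElem_mem hy)
  have hmemcol : ∀ y, y < cs.length →
      (pvRow cs y).getD z 0 ∈ List.map (fun c => c.getD z 0) cs := by
    intro y hy
    rw [pvRow_getElem cs y hy]
    exact List.mem_map.2 ⟨cs[y], List.getElem_mem hy, rfl⟩
  have hiff : ∀ a b : Bool, (a = true ↔ b = true) → a = b := by
    intro a b h; cases a <;> cases b <;> simp_all
  apply hiff
  simp only [List.contains_iff_mem, List.mem_filter, List.all_eq_true, pvPass_iff]
  constructor
  · rintro ⟨_, hallgood⟩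
    refine ⟨hn, fun y hy hyx => ?_⟩
    rw [pvIn_iff]
    refine ⟨hrowlen x hxn, hrowlen y hy, ?_⟩
    exact hallgood _ ((PySem.Set.mem_ofList _ _).2 (hmemcol y hy))
  · rintro ⟨_, hally⟩
    constructor
    · exact (PySem.Set.mem_ofList _ _).2 (hmemcol x hxn)
    · intro w hw
      rcases List.mem_map.1 ((PySem.Set.mem_ofList _ _).1 hw) with ⟨c, hc, rfl⟩
      rcases List.mem_iff_getElem.1 hc with ⟨y, hy, rfl⟩
      by_cases hyx : y = x
      · subst hyx
        rw [← pvRow_getElem cs y hy, PySem.Int.bxor_self]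
        decide
      · have := (pvIn_iff cs x y z).1 (hally y hy hyx)
        rw [← pvRow_getElem cs y hy]
        exact this.2.2

theorem pvRangeGetElem? (n i : Nat) : (List.range n)[i]? = if i < n then some i else none := by
  by_cases h : i < n
  · simp [h]
  · simp [h]

theorem pvB_char (cs : List (List Int)) (z : Nat) :
    (partial_key_alt cs)[z]? = if z < (cs.getD 0 []).length then some (pvRes cs z) else none := by
  unfold partial_key_alt
  simp only [List.getElem?_map, pvRangeGetElem?]
  by_cases hz : z < (cs.getD 0 []).length
  · simp only [if_pos hz, Option.map_some]
    congr 1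
    by_cases h2 : cs.length < 2
    · rw [if_pos (by simp [h2])]
      rw [pvRes, pvFoldlIfNone]
      intro x hx
      simp only [pvPass, Bool.and_eq_false_iff]
      left; simpa using (by omega : ¬ 2 ≤ cs.length)
    · by_cases hshort : cs.any (fun c => c.length ≤ z)
      · rw [if_pos (by simp [hshort])]
        rcases List.any_eq_true.1 hshort with ⟨c, hc, hcz⟩
        rcases List.mem_iff_getElem.1 hc with ⟨i, hi, rfl⟩
        rw [pvRes, pvFoldlIfNone]
        intro x _
        refine pvPass_false_of_short cs z i hi ?_ x
        rw [List.getD, List.getElem?_eq_getElem hi]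
        simpa using hcz
      · rw [if_neg (by simp_all)]
        have hall : ∀ c ∈ cs, z < c.length := by
          intro c hc
          by_contra hcz
          exact hshort (List.any_eq_true.2 ⟨c, hc, by simpa using hcz⟩)
        exact pvB_inner cs z (by omega) hall
  · simp only [if_neg hz, Option.map_none]


-- ---------- A-side machinery ----------

-- A's membership test equals B's pvGoodB (same three ranges, different association)
theorem pvCond_eq (v : Int) : (v == 0 || pvLettersA v) = pvGoodB v := by
  unfold pvLettersA pvGoodB
  rw [Bool.or_comm (97 ≤ v && v ≤ 122) (65 ≤ v && v ≤ 90), ← Bool.or_assoc]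

theorem pvXorA_length (a b : List Int) : (pvXorA a b).length = min a.length b.length := by
  simp [pvXorA]

theorem pvXorA_getD (a b : List Int) (z : Nat) (ha : z < a.length) (hb : z < b.length) :
    (pvXorA a b).getD z 0 = PySem.Int.bxor (a.getD z 0) (b.getD z 0) := by
  have hz : z < (pvXorA a b).length := by rw [pvXorA_length]; omega
  rw [List.getD, List.getD, List.getD, List.getElem?_eq_getElem hz,
    List.getElem?_eq_getElem ha, List.getElem?_eq_getElem hb]
  simp [pvXorA, List.getElem_zip]

-- the list of positions A's inner z-loop records for the pair (x, y)
def pvZL (cs : List (List Int)) (x y : Nat) : List Nat :=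
  (List.range (pvXorA (pvRow cs x) (pvRow cs y)).length).filter
    (fun z => pvGoodB ((pvXorA (pvRow cs x) (pvRow cs y)).getD z 0))

-- all positions recorded during x's pass (multiset: one occurrence per vouching y)
def pvZs (cs : List (List Int)) (x : Nat) : List Nat :=
  (List.range cs.length).flatMap (fun y => if x = y then [] else pvZL cs x y)

theorem pvMem_pvZL (cs : List (List Int)) (x y z : Nat) :
    z ∈ pvZL cs x y ↔ pvIn cs x y z = true := by
  unfold pvZL
  rw [List.mem_filter, List.mem_range, pvXorA_length, pvIn_iff]
  constructor
  · rintro ⟨hz, hgood⟩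
    rw [pvXorA_getD _ _ _ (by omega) (by omega)] at hgood
    exact ⟨by omega, by omega, hgood⟩
  · rintro ⟨h1, h2, hgood⟩
    rw [pvXorA_getD _ _ _ h1 h2]
    exact ⟨by omega, hgood⟩

theorem pvNodup_pvZL (cs : List (List Int)) (x y : Nat) : (pvZL cs x y).Nodup :=
  List.nodup_range.filter _

theorem pvCount_pvZL (cs : List (List Int)) (x y z : Nat) :
    (pvZL cs x y).count z = if pvIn cs x y z = true then 1 else 0 := by
  by_cases h : pvIn cs x y z = true
  · rw [if_pos h]
    exact List.count_eq_one_of_mem (pvNodup_pvZL cs x y) ((pvMem_pvZL cs x y z).2 h)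
  · rw [if_neg h]
    exact List.count_eq_zero_of_not_mem (fun hm => h ((pvMem_pvZL cs x y z).1 hm))

theorem pvFoldlFlatMap {α β γ : Type} (l : List α) (g : α → List β) (f : γ → β → γ) (init : γ) :
    (l.flatMap g).foldl f init = l.foldl (fun c a => (g a).foldl f c) init := by
  induction l generalizing init with
  | nil => rfl
  | cons a l ih => simp [List.flatMap_cons, List.foldl_append, ih]

theorem pvFoldlCongr {α β : Type} (l : List α) (f g : β → α → β) (i : β)
    (h : ∀ a ∈ l, ∀ b, f b a = g b a) : l.foldl f i = l.foldl g i := by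
  induction l generalizing i with
  | nil => rfl
  | cons a l ih =>
    simp only [List.foldl_cons, h a (by simp)]
    exact ih _ (fun a ha b => h a (by simp [ha]) b)

theorem pvInsertStep (d : PySem.Dict Nat Int) (z : Nat) :
    (if d.contains z = false then d.insert z 1 else d.insert z (d.getD z 0 + 1))
      = d.insert z (d.getD z 0 + 1) := by
  by_cases hc : d.contains z = false
  · rw [if_pos hc, PySem.Dict.getD_of_not_contains d 0 hc]
    norm_num
  · rw [if_neg hc]

theorem pvCountFlatMap (l : List Nat) (g : Nat → List Nat) (q : Nat → Bool) (z : Nat)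
    (h : ∀ y ∈ l, (g y).count z = if q y then 1 else 0) :
    (l.flatMap g).count z = l.countP q := by
  induction l with
  | nil => simp
  | cons a l ih =>
    rw [List.flatMap_cons, List.count_append, List.countP_cons,
      h a (by simp), ih (fun y hy => h y (by simp [hy]))]
    by_cases hq : q a <;> simp [hq] <;> omega

theorem pvMem_pvZs (cs : List (List Int)) (x z : Nat) :
    z ∈ pvZs cs x ↔ ∃ y, y < cs.length ∧ y ≠ x ∧ pvIn cs x y z = true := by
  unfold pvZs
  rw [List.mem_flatMap]
  constructor
  · rintro ⟨y, hy, hz⟩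
    by_cases hxy : x = y
    · simp [hxy] at hz
    · rw [if_neg hxy] at hz
      exact ⟨y, List.mem_range.1 hy, fun h => hxy h.symm, (pvMem_pvZL cs x y z).1 hz⟩
  · rintro ⟨y, hy, hyx, hin⟩
    refine ⟨y, List.mem_range.2 hy, ?_⟩
    rw [if_neg (fun h => hyx h.symm)]
    exact (pvMem_pvZL cs x y z).2 hin

theorem pvCount_pvZs (cs : List (List Int)) (x z : Nat) :
    (pvZs cs x).count z = (List.range cs.length).countP (fun y => decide (y ≠ x) && pvIn cs x y z) := by
  unfold pvZs
  apply pvCountFlatMap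
  intro y _
  by_cases hxy : x = y
  · subst hxy
    simp
  · rw [if_neg hxy, pvCount_pvZL]
    have : decide (y ≠ x) = true := by simp; exact fun h => hxy h.symm
    by_cases hin : pvIn cs x y z = true <;> simp [hin, this]

theorem pvCountP_ne (n x : Nat) (hx : x < n) :
    (List.range n).countP (fun y => decide (y ≠ x)) = n - 1 := by
  induction n with
  | zero => omega
  | succ n ih =>
    rw [List.range_succ, List.countP_append]
    by_cases hxn : x = n
    · rw [List.countP_eq_length.2 (fun y hy => by
        simp only [decide_eq_true_eq]
        have := List.mem_range.1 hy; omega)]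
      simp [← hxn]
    · rw [ih (by omega)]
      have hne : n ≠ x := fun h => hxn h.symm
      simp [List.countP_cons, hne]
      omega

theorem pvCountP_le (n x : Nat) (hx : x < n) (q : Nat → Bool) :
    (List.range n).countP (fun y => decide (y ≠ x) && q y) ≤ n - 1 := by
  calc (List.range n).countP (fun y => decide (y ≠ x) && q y)
      ≤ (List.range n).countP (fun y => decide (y ≠ x)) :=
        List.countP_mono_left (fun a _ h => by
          simp only [Bool.and_eq_true] at h; exact h.1)
    _ = n - 1 := pvCountP_ne n x hx

theorem pvCountP_range (n x : Nat) (hx : x < n) (q : Nat → Bool) :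
    ((List.range n).countP (fun y => decide (y ≠ x) && q y) = n - 1) ↔
      ∀ y < n, y ≠ x → q y = true := by
  induction n with
  | zero => omega
  | succ n ih =>
    rw [List.range_succ, List.countP_append]
    simp only [List.countP_cons, List.countP_nil, Nat.zero_add]
    by_cases hxn : x = n
    · have hcongr : (List.range n).countP (fun y => decide (y ≠ x) && q y)
          = (List.range n).countP q := by
        apply List.countP_congr
        intro y hy
        have hy' := List.mem_range.1 hy
        simp [show y ≠ x by omega]
      have hlast : (decide (n ≠ x) && q n) = false := by simp [← hxn]
      rw [hcongr, hlast]
      have hlen : (List.range n).length = n := List.length_range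
      simp only [if_neg (by simp : ¬ (false = true)), Nat.add_zero]
      constructor
      · intro h y hy hyn
        have hall := List.countP_eq_length.1
          (by omega : (List.range n).countP q = (List.range n).length)
        exact hall y (List.mem_range.2 (by omega))
      · intro h
        have : (List.range n).countP q = (List.range n).length :=
          List.countP_eq_length.2 (fun y hy => h y
            (by have := List.mem_range.1 hy; omega)
            (by have := List.mem_range.1 hy; omega))
        omega
    · have hx' : x < n := by omega
      have hb := pvCountP_le n x hx' q
      have hlast : (decide (n ≠ x) && q n) = q n := by
        simp [show n ≠ x from fun h => hxn h.symm]
      rw [hlast]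
      constructor
      · intro h y hy hyx
        have hcnt : (List.range n).countP (fun y => decide (y ≠ x) && q y) = n - 1 ∧ q n = true := by
          by_cases hqn : q n = true
          · rw [if_pos hqn] at h
            exact ⟨by omega, hqn⟩
          · rw [if_neg (by simp [hqn])] at h
            omega
        by_cases hyn : y = n
        · subst hyn; exact hcnt.2
        · exact (ih hx').1 hcnt.1 y (by omega) hyx
      · intro h
        have hqn : q n = true := h n (by omega) (fun hc => hxn hc.symm)
        have := (ih hx').2 (fun y hy hyx => h y (by omega) hyx)
        rw [if_pos hqn]
        omega

theorem pvDictA (cs : List (List Int)) (x : Nat) :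
    ((List.range cs.length).foldl (fun d y =>
        if x ≠ y then
          let xored := pvXorA (cs.getD x []) (cs.getD y [])
          (List.range xored.length).foldl (fun d z =>
            if xored.getD z 0 == 0 || pvLettersA (xored.getD z 0) then
              if d.contains z = false then d.insert z 1 else d.insert z (d.getD z 0 + 1)
            else d) d
        else d) (PySem.Dict.empty : PySem.Dict Nat Int))
      = (pvZs cs x).foldl (fun d z => d.insert z (d.getD z 0 + 1)) PySem.Dict.empty := by
  unfold pvZs
  rw [pvFoldlFlatMap]
  apply pvFoldlCongr
  intro y _ d
  by_cases hxy : x = y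
  · simp [hxy]
  · rw [if_pos hxy, if_neg hxy]
    show _ = (pvZL cs x y).foldl _ d
    unfold pvZL
    rw [List.foldl_filter]
    apply pvFoldlCongr
    intro z _ d
    simp only [pvRow]
    rw [pvCond_eq]
    by_cases hg : pvGoodB ((pvXorA (cs.getD x []) (cs.getD y [])).getD z 0) = true
    · rw [if_pos hg, if_pos hg, pvInsertStep]
    · rw [if_neg hg, if_neg hg]


theorem pvCond_iff (cs : List (List Int)) (x z : Nat) (hx : x < cs.length) :
    (z ∈ pvZs cs x ∧ ((((pvZs cs x).count z : Int)) == (cs.length : Int) - 1) = true)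
      ↔ pvPass cs x z = true := by
  rw [beq_iff_eq, pvMem_pvZs, pvCount_pvZs, pvPass_iff]
  have hcast : (((List.range cs.length).countP (fun y => decide (y ≠ x) && pvIn cs x y z) : Int)
      = (cs.length : Int) - 1) ↔
      ((List.range cs.length).countP (fun y => decide (y ≠ x) && pvIn cs x y z) = cs.length - 1) := by
    omega
  rw [hcast, pvCountP_range cs.length x hx]
  constructor
  · rintro ⟨⟨y, hy, hyx, _⟩, hall⟩
    exact ⟨by omega, hall⟩
  · rintro ⟨hn2, hall⟩
    have hex : ∃ y, y < cs.length ∧ y ≠ x := by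
      by_cases h0 : x = 0
      · exact ⟨1, by omega, by omega⟩
      · exact ⟨0, by omega, fun h => h0 h.symm⟩
    rcases hex with ⟨y, hy, hyx⟩
    exact ⟨⟨y, hy, hyx, hall y hy hyx⟩, hall⟩

theorem pvFoldlSet (ks : List Nat) (p : Nat → Bool) (f : Nat → Option Int)
    (key : List (Option Int)) (z : Nat) :
    (ks.foldl (fun key k => if p k = true then key.set k (f k) else key) key)[z]? =
      if z ∈ ks ∧ p z = true ∧ z < key.length then some (f z) else key[z]? := by
  induction ks generalizing key with
  | nil => simp
  | cons k ks ih =>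
    rw [List.foldl_cons, ih]
    have hlen : (if p k = true then key.set k (f k) else key).length = key.length := by
      split <;> simp
    rw [hlen]
    by_cases h1 : z ∈ ks ∧ p z = true ∧ z < key.length
    · rw [if_pos h1, if_pos ⟨by simp [h1.1], h1.2.1, h1.2.2⟩]
    · rw [if_neg h1]
      by_cases h2 : z = k ∧ p z = true ∧ z < key.length
      · rcases h2 with ⟨rfl, hp, hlt⟩
        rw [if_pos hp, List.getElem?_set, if_pos rfl, if_pos hlt,
          if_pos ⟨by simp, hp, hlt⟩]
      · have hset : (if p k = true then key.set k (f k) else key)[z]? = key[z]? := by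
          by_cases hk : k = z
          · subst hk
            by_cases hp : p k = true
            · rw [if_pos hp, List.getElem?_set, if_pos rfl]
              have hlt : ¬ k < key.length := fun hlt => h2 ⟨rfl, hp, hlt⟩
              rw [if_neg hlt, eq_comm]
              exact List.getElem?_eq_none (by omega)
            · rw [if_neg hp]
          · split
            · rw [List.getElem?_set, if_neg hk]
            · rfl
        rw [hset, if_neg (by
          rintro ⟨hmem, hp, hlt⟩
          rcases List.mem_cons.1 hmem with h | h
          · exact h2 ⟨h, hp, hlt⟩
          · exact h1 ⟨h, hp, hlt⟩)]

theorem pvFoldlSetLength {α : Type} (l : List α) (P : α → Bool) (g : α → Nat)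
    (h : α → Option Int) (key : List (Option Int)) :
    (l.foldl (fun key p => if P p = true then key.set (g p) (h p) else key) key).length
      = key.length := by
  induction l generalizing key with
  | nil => rfl
  | cons a l ih =>
    rw [List.foldl_cons, ih]
    split <;> simp

-- the body of A's outer loop (space_counter inlined at its single use)
def pvStepX (cs : List (List Int)) (key : List (Option Int)) (x : Nat) : List (Option Int) :=
  ((List.range cs.length).foldl (fun d y =>
      if x ≠ y then
        let xored := pvXorA (cs.getD x []) (cs.getD y [])
        (List.range xored.length).foldl (fun d z =>
          if xored.getD z 0 == 0 || pvLettersA (xored.getD z 0) then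
            if d.contains z = false then d.insert z 1 else d.insert z (d.getD z 0 + 1)
          else d) d
      else d) (PySem.Dict.empty : PySem.Dict Nat Int)).items.foldl (fun key ic =>
    if ic.2 == (cs.length : Int) - 1 then
      key.set ic.1 (some (PySem.Int.bxor 32 ((cs.getD x []).getD ic.1 0)))
    else key) key

theorem pvPartialKeyEq (cs : List (List Int)) :
    partial_key cs = (List.range cs.length).foldl (pvStepX cs)
      ((List.range (cs.getD 0 []).length).map (fun _ => none)) := rfl

theorem pvStepX_length (cs : List (List Int)) (key : List (Option Int)) (x : Nat) :
    (pvStepX cs key x).length = key.length := by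
  unfold pvStepX
  exact pvFoldlSetLength _ (fun ic : Nat × Int => ic.2 == (cs.length : Int) - 1)
    (fun ic => ic.1) (fun ic => some (PySem.Int.bxor 32 ((cs.getD x []).getD ic.1 0))) key

theorem pvStepX_getElem (cs : List (List Int)) (key : List (Option Int)) (x : Nat)
    (hx : x < cs.length) (z : Nat) :
    (pvStepX cs key x)[z]? =
      if pvPass cs x z = true ∧ z < key.length then some (pvVal cs x z) else key[z]? := by
  unfold pvStepX
  rw [pvDictA cs x]
  have hnd : ((pvZs cs x).foldl (fun d z => d.insert z (d.getD z 0 + 1))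
      (PySem.Dict.empty : PySem.Dict Nat Int)).keys.Nodup :=
    PySem.Dict.nodup_keys_foldl_insert _ _ _ PySem.Dict.nodup_keys_empty
  rw [PySem.Dict.items_eq_map_keys _ hnd 0, List.foldl_map, pvFoldlSet]
  have hkeys : ((pvZs cs x).foldl (fun d z => d.insert z (d.getD z 0 + 1))
      (PySem.Dict.empty : PySem.Dict Nat Int)).keys = PySem.Set.ofList (pvZs cs x) := by
    rw [PySem.Dict.keys_foldl_insert]
    rw [PySem.Dict.keys_empty]
    exact PySem.Set.update_empty _
  have hgetD : ((pvZs cs x).foldl (fun d z => d.insert z (d.getD z 0 + 1))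
      (PySem.Dict.empty : PySem.Dict Nat Int)).getD z 0 = ((pvZs cs x).count z : Int) := by
    rw [PySem.Dict.getD_foldl_insert_add_one]
    simp
  rw [hkeys, hgetD]
  apply if_congr ?_ rfl rfl
  rw [PySem.Set.mem_ofList, and_assoc.symm.trans (and_congr_left' (pvCond_iff cs x z hx))]

theorem pvOuter (cs : List (List Int)) (l : List Nat) (hl : ∀ x ∈ l, x < cs.length)
    (key : List (Option Int)) (hkey : key.length = (cs.getD 0 []).length) (z : Nat) :
    (l.foldl (pvStepX cs) key)[z]? =
      key[z]?.map (fun kz =>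
        l.foldl (fun k x => if pvPass cs x z = true then pvVal cs x z else k) kz) := by
  induction l generalizing key with
  | nil => simp
  | cons x l ih =>
    simp only [List.foldl_cons]
    have hx := hl x (by simp)
    have hlen : (pvStepX cs key x).length = key.length := pvStepX_length cs key x
    rw [ih (fun a ha => hl a (by simp [ha])) _ (by rw [hlen, hkey]),
      pvStepX_getElem cs key x hx z]
    by_cases hp : pvPass cs x z = true
    · have hzL : z < key.length := by rw [hkey]; exact pvPass_lt cs x z hp
      rw [if_pos ⟨hp, hzL⟩, List.getElem?_eq_getElem hzL]
      simp [hp]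
    · rw [if_neg (fun h => hp h.1)]
      cases hkz : key[z]? <;> simp [hp]

theorem pvA_char (cs : List (List Int)) (z : Nat) :
    (partial_key cs)[z]? = if z < (cs.getD 0 []).length then some (pvRes cs z) else none := by
  rw [pvPartialKeyEq, pvOuter cs (List.range cs.length) (fun x hx => List.mem_range.1 hx) _
    (by simp) z]
  rw [List.getElem?_map, pvRangeGetElem?]
  by_cases hz : z < (cs.getD 0 []).length
  · rw [if_pos hz, if_pos hz]
    rfl
  · rw [if_neg hz, if_neg hz]
    rfl

-- ===== VERDICT (by name: the statement is the Claim_ definition above) =====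
theorem partial_key_spec : Claim_equal_partial_key := by
  intro cs _ _
  unfold Spec_partial_key
  apply List.ext_getElem?
  intro z
  rw [pvA_char, pvB_char]
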